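-- pv_equiv track=rewrite | github.com/jihun-beyless/jihun_augment | augment.py | array_DB_batch
-- ===== SOURCE A (Python) =====
-- def array_DB_batch(grid, batch_map, array_method):
--     '''
--     클래스 밖의 함수로 단순히 물품의 합성 순서를 결정하는 부분
--     물품배치를 map 형태로 만들었지만 실제 물품 합성시 합성 순서는 물품의 순차적인 순서가 아님
--     예를들면 일반 음료수나 세우는 물품은 중앙에서 가장 먼 위치부터 합성이 들어가야 함
--     그리고 트레이가 필요한 눕혀진 물품은 맨 뒤부터 합성이 시작되어야 함(특정한 방향)
--     따라서 이게 맞게 합성 순서를 다시 계산하는 함수를 추가해 놓음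
--     입력: grid정보, batch_map, 합성방식
--     출력: 합성할 순서에 맞게 x,y  grid를 재 배열한 tuple
--     '''
--     # 합성 방법으로 가장 단순한 방법은 특정 위치와의 실제 거리를 계산하여 가장 먼 곳부터 합성을 진행
--     if array_method==1: c_point = [3,3]
--     elif array_method==2: c_point = [3,0]
--
--     dis_info_list=[]
--     for col in range(grid[0]):
--         for row in range(grid[1]):
--             if batch_map[col][row]==0:
--                 continue
--             dx = col-c_point[0]
--             dy = row-c_point[1]
--             distance = dx*dx+dy*dy
--             dis_info_list.append([col, row, distance])
--
--     #정렬
--     dis_info_tuple = tuple(dis_info_list)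
--     array_dis_info = sorted(dis_info_tuple, key=lambda x: -x[2])
--     return array_dis_info
-- ===== SOURCE B (Python) =====
-- def array_DB_batch(grid, batch_map, array_method):
--     # Build the non-zero cell list with one comprehension, then order it by
--     # repeatedly extracting the group of maximum remaining distance
--     # (group-selection instead of a comparison sort; stable within a group).
--     if array_method == 1: c_point = [3, 3]
--     elif array_method == 2: c_point = [3, 0]
--
--     cells = [[col, row, (col - c_point[0]) ** 2 + (row - c_point[1]) ** 2]
--              for col in range(grid[0])
--              for row in range(grid[1])
--              if batch_map[col][row] != 0]
--
--     out = []
--     while cells: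
--         m = max(c[2] for c in cells)
--         out += [c for c in cells if c[2] == m]
--         cells = [c for c in cells if c[2] != m]
--     return out
-- ===== Notes on version B (the rewrite author's own statement) =====
-- stated objective: alternative
-- what changed: B builds the non-zero cell list with a single comprehension and orders it by repeated extraction of the maximum-distance group (selection by groups) instead of A's append loop followed by a stable comparison sort.
import Mathlib
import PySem

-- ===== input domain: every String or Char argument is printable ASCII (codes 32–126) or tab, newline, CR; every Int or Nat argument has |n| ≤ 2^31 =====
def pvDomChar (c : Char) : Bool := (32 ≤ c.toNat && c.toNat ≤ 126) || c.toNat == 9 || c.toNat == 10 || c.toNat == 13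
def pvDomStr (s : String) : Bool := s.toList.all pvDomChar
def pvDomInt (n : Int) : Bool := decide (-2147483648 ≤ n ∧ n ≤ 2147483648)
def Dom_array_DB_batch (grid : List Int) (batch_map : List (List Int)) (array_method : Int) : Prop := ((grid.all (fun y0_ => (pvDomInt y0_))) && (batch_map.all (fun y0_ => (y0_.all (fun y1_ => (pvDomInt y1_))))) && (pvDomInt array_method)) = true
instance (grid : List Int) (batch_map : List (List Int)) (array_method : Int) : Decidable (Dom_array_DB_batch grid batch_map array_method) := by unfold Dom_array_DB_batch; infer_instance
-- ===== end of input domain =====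

-- B builds the non-zero cell list with one comprehension and orders it by repeatedly
-- extracting the maximum-distance group instead of A's append loop + stable sort
-- (objective: alternative algorithm; same return value).

-- ===== PORT A =====
def array_DB_batch (grid : List Int) (batch_map : List (List Int)) (array_method : Int) : List (List Int) :=
  -- Python's c_point is unbound when array_method ∉ {1,2}; Pre_ guarantees it is never read
  -- then, so the port's [] default is never consulted on admitted inputs.
  let c_point : List Int := if array_method = 1 then [3, 3] else if array_method = 2 then [3, 0] else []
  let dis_info_list : List (List Int) :=
    (PySem.List.pyRange 0 ((PySem.List.pyGet? grid 0).getD 0) 1).foldl (fun acc col =>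
      (PySem.List.pyRange 0 ((PySem.List.pyGet? grid 1).getD 0) 1).foldl (fun acc row =>
        if ((PySem.List.pyGet? ((PySem.List.pyGet? batch_map col).getD []) row).getD 0) = 0 then acc
        else
          let dx := col - ((PySem.List.pyGet? c_point 0).getD 0)
          let dy := row - ((PySem.List.pyGet? c_point 1).getD 0)
          let distance := dx * dx + dy * dy
          acc ++ [[col, row, distance]]) acc) []
  PySem.List.sorted dis_info_list (fun x => -((PySem.List.pyGet? x 2).getD 0)) false

-- ===== PORT B =====
-- c[2] of a cell (the stored squared distance)
def pvSelKey (x : List Int) : Int := (PySem.List.pyGet? x 2).getD 0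

-- termination measure for the selection loop: removing the max-key group shrinks the list
lemma pv_filter_lt (p : List Int → Bool) (l : List (List Int))
    (h : ∃ x ∈ l, p x = false) : (l.filter p).length < l.length := by
  induction l with
  | nil => rcases h with ⟨x, hx, _⟩; cases hx
  | cons a t ih =>
    by_cases ha : p a = true
    · rcases h with ⟨x, hx, hpx⟩
      rcases List.mem_cons.mp hx with rfl | hx
      · rw [ha] at hpx; cases hpx
      · simpa [ha] using Nat.succ_lt_succ (ih ⟨x, hx, hpx⟩)
    · have := List.length_filter_le p t
      simp only [List.filter_cons, ha]
      simpa using Nat.lt_succ_of_le this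

lemma pvSelect_dec (c : List Int) (cs : List (List Int)) :
    ((c :: cs).filter (fun x => pvSelKey x != (cs.map pvSelKey).foldl max (pvSelKey c))).length
      < (c :: cs).length := by
  apply pv_filter_lt
  rcases PySem.List.foldl_max_mem (cs.map pvSelKey) (pvSelKey c) with h | h
  · exact ⟨c, by simp, by simp [h]⟩
  · rcases List.mem_map.mp h with ⟨y, hy, hk⟩
    exact ⟨y, by simp [hy], by simp [hk]⟩

-- the while-loop of Source B: pop the maximum-key group, recurse on the rest
def pvSelect : List (List Int) → List (List Int)
  | [] => []
  | c :: cs =>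
    -- m = max(c[2] for c in cells), the running max of the keys
    ((c :: cs).filter (fun x => pvSelKey x == (cs.map pvSelKey).foldl max (pvSelKey c)))
      ++ pvSelect ((c :: cs).filter (fun x => pvSelKey x != (cs.map pvSelKey).foldl max (pvSelKey c)))
  termination_by l => l.length
  decreasing_by simpa using pvSelect_dec c cs

def array_DB_batch_alt (grid : List Int) (batch_map : List (List Int)) (array_method : Int) : List (List Int) :=
  let c_point : List Int := if array_method = 1 then [3, 3] else if array_method = 2 then [3, 0] else []
  let cells : List (List Int) :=
    (PySem.List.pyRange 0 ((PySem.List.pyGet? grid 0).getD 0) 1).flatMap (fun col =>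
      ((PySem.List.pyRange 0 ((PySem.List.pyGet? grid 1).getD 0) 1).filter (fun row =>
          ((PySem.List.pyGet? ((PySem.List.pyGet? batch_map col).getD []) row).getD 0) != 0)).map
        (fun row =>
          [col, row,
           (col - ((PySem.List.pyGet? c_point 0).getD 0)) ^ 2
             + (row - ((PySem.List.pyGet? c_point 1).getD 0)) ^ 2]))
  pvSelect cells

-- ===== PRECONDITION & SPEC =====
-- Pre_ excludes exactly the inputs where the Python raises: grid[0]/grid[1] IndexError,
-- batch_map[col][row] IndexError, and the UnboundLocalError on c_point when array_method ∉ {1,2}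
-- and some scanned cell is non-zero.
def Pre_array_DB_batch (grid : List Int) (batch_map : List (List Int)) (array_method : Int) : Prop :=
  grid ≠ [] ∧
  (0 < grid.headD 0 →
    2 ≤ grid.length ∧
    (0 < (PySem.List.pyGet? grid 1).getD 0 →
      grid.headD 0 ≤ (batch_map.length : Int) ∧
      (∀ r ∈ batch_map.take (grid.headD 0).toNat,
        (PySem.List.pyGet? grid 1).getD 0 ≤ (r.length : Int)) ∧
      (array_method = 1 ∨ array_method = 2 ∨
        ∀ r ∈ batch_map.take (grid.headD 0).toNat,
          ∀ v ∈ r.take ((PySem.List.pyGet? grid 1).getD 0).toNat, v = 0)))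
instance (grid : List Int) (batch_map : List (List Int)) (array_method : Int) : Decidable (Pre_array_DB_batch grid batch_map array_method) := by unfold Pre_array_DB_batch; infer_instance

def pvWitness_array_DB_batch : List Int × List (List Int) × Int := ([2, 2], [[1, 0], [0, 3]], 1)

def Spec_array_DB_batch (grid : List Int) (batch_map : List (List Int)) (array_method : Int) (out : List (List Int)) : Prop := out = array_DB_batch_alt grid batch_map array_method
instance (grid : List Int) (batch_map : List (List Int)) (array_method : Int) (out : List (List Int)) : Decidable (Spec_array_DB_batch grid batch_map array_method out) := by unfold Spec_array_DB_batch; infer_instance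

-- ===== CLAIM (what is proved, stated in full; the proofs are below) =====
def Claim_equal_array_DB_batch : Prop := ∀ (grid : List Int) (batch_map : List (List Int)) (array_method : Int), Dom_array_DB_batch grid batch_map array_method → Pre_array_DB_batch grid batch_map array_method → Spec_array_DB_batch grid batch_map array_method (array_DB_batch grid batch_map array_method)

-- ===== LEMMAS AND PROOFS =====

-- A's nested append loop produces the flat filtered scan list.
lemma pv_nested_append (cols rows : List Int) (skip : Int → Int → Prop)
    [inst : ∀ c r, Decidable (skip c r)] (f : Int → Int → List Int) :
    cols.foldl (fun acc col => rows.foldl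
        (fun acc row => if skip col row then acc else acc ++ [f col row]) acc) []
      = cols.flatMap (fun col =>
          (rows.filter (fun row => decide (¬ skip col row))).map (f col)) := by
  have h1 : ∀ (acc : List (List Int)) (col : Int),
      rows.foldl (fun acc row => if skip col row then acc else acc ++ [f col row]) acc
        = acc ++ (rows.filter (fun row => decide (¬ skip col row))).map (f col) := by
    intro acc col
    rw [← PySem.List.foldl_append_ite (p := fun row => ¬ skip col row) (f col)]
    apply PySem.List.foldl_congr_mem; intro a x _; rw [ite_not]
  calc cols.foldl (fun acc col => rows.foldl
        (fun acc row => if skip col row then acc else acc ++ [f col row]) acc) []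
      = cols.foldl (fun acc col =>
          acc ++ (rows.filter (fun row => decide (¬ skip col row))).map (f col)) [] := by
        apply PySem.List.foldl_congr_mem; intro a x _; exact h1 a x
    _ = _ := by rw [PySem.List.foldl_append_eq_flatMap]; simp

-- insertBy passes over a prefix it does not go before
lemma pv_insertBy_append (before : List Int → List Int → Bool) (x : List Int)
    (F S : List (List Int)) (h : ∀ y ∈ F, before x y = false) :
    PySem.List.insertBy before x (F ++ S) = F ++ PySem.List.insertBy before x S := by
  induction F with
  | nil => rfl
  | cons a F ih =>
    simp only [List.cons_append, PySem.List.insertBy, h a (by simp)]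
    simp only [Bool.false_eq_true, if_false, List.cons.injEq, true_and]
    exact ih (fun y hy => h y (by simp [hy]))

lemma pv_insertBy_all (before : List Int → List Int → Bool) (x : List Int)
    (S : List (List Int)) (h : ∀ y ∈ S, before x y = true) :
    PySem.List.insertBy before x S = x :: S := by
  cases S with
  | nil => rfl
  | cons b t => simp [PySem.List.insertBy, h b (by simp)]

-- A stable sort puts the minimal-key elements first, in input order.
lemma pv_sorted_min_split (key : List Int → Int) (L : List (List Int)) (m : Int)
    (hmin : ∀ x ∈ L, m ≤ key x) :
    PySem.List.sorted L key false
      = L.filter (fun x => key x == m)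
        ++ PySem.List.sorted (L.filter (fun x => key x != m)) key false := by
  induction L using List.reverseRecOn with
  | nil => rfl
  | append_singleton L x ih =>
    have hminL : ∀ y ∈ L, m ≤ key y := fun y hy => hmin y (by simp [hy])
    have hL := ih hminL
    rw [PySem.List.sorted_eq_foldl_insertBy, List.foldl_append, List.foldl_cons, List.foldl_nil,
        ← PySem.List.sorted_eq_foldl_insertBy, hL, List.filter_append, List.filter_append]
    by_cases hx : key x = m
    · have hF : ∀ y ∈ L.filter (fun x => key x == m),
          (decide (key x < key y)) = false := by
        intro y hy
        have := List.of_mem_filter hy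
        simp only [beq_iff_eq] at this
        simp [hx, this]
      rw [pv_insertBy_append _ _ _ _ hF]
      have hS : ∀ y ∈ PySem.List.sorted (L.filter (fun x => key x != m)) key false,
          (decide (key x < key y)) = true := by
        intro y hy
        rw [PySem.List.mem_sorted] at hy
        have h1 := List.of_mem_filter hy
        have h2 := hminL y (List.mem_of_mem_filter hy)
        simp only [bne_iff_ne, ne_eq] at h1
        simp only [decide_eq_true_eq, hx]
        omega
      rw [pv_insertBy_all _ _ _ hS]
      simp [hx]
    · have hxm : m < key x := lt_of_le_of_ne (hmin x (by simp)) (fun h => hx h.symm)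
      have hF : ∀ y ∈ L.filter (fun x => key x == m),
          (decide (key x < key y)) = false := by
        intro y hy
        have := List.of_mem_filter hy
        simp only [beq_iff_eq] at this
        simp only [decide_eq_false_iff_not, not_lt, this]
        omega
      rw [pv_insertBy_append _ _ _ _ hF]
      have h1 : (List.filter (fun y => key y == m) [x]) = [] := by simp [hx]
      have h2 : (List.filter (fun y => key y != m) [x]) = [x] := by simp [hx]
      rw [h1, h2, List.append_nil,
          PySem.List.sorted_eq_foldl_insertBy (L.filter (fun x => key x != m) ++ [x]),
          List.foldl_append, List.foldl_cons, List.foldl_nil,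
          ← PySem.List.sorted_eq_foldl_insertBy]

-- A's stable descending sort IS B's repeated extraction of the max-key group.
lemma pv_sorted_eq_select (L : List (List Int)) :
    PySem.List.sorted L (fun x => -(pvSelKey x)) false = pvSelect L := by
  induction L using pvSelect.induct with
  | case1 => simp [pvSelect, PySem.List.sorted_eq_foldl_insertBy]
  | case2 c cs ih =>
    rw [pvSelect]
    have hattach : (List.map (fun x => match x with | ⟨x, _⟩ => pvSelKey x) cs.attach)
        = List.map pvSelKey cs := by simp
    rw [hattach] at ih
    set m := (cs.map pvSelKey).foldl max (pvSelKey c) with hm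
    have hub : ∀ x ∈ c :: cs, pvSelKey x ≤ m := by
      intro x hx
      have h := PySem.List.le_foldl_max (cs.map pvSelKey) (pvSelKey c)
      rcases List.mem_cons.mp hx with h' | h'
      · subst h'; exact h.1
      · exact h.2 _ (List.mem_map_of_mem h')
    have hmin : ∀ x ∈ c :: cs, -m ≤ -(pvSelKey x) := fun x hx => by
      have := hub x hx; omega
    rw [pv_sorted_min_split (fun x => -(pvSelKey x)) (c :: cs) (-m) hmin]
    have hf1 : (c :: cs).filter (fun x => -(pvSelKey x) == -m)
        = (c :: cs).filter (fun x => pvSelKey x == m) := by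
      apply List.filter_congr; intro x _
      by_cases h : pvSelKey x = m <;> simp [h, neg_inj]
    have hf2 : (c :: cs).filter (fun x => -(pvSelKey x) != -m)
        = (c :: cs).filter (fun x => pvSelKey x != m) := by
      apply List.filter_congr; intro x _
      by_cases h : pvSelKey x = m <;> simp [h, bne, neg_inj]
    rw [hf1, hf2, ih]

-- the two ports scan the same cells (≠-filter vs skip-continue, x^2 vs x*x)
lemma pv_cells_eq (grid : List Int) (batch_map : List (List Int)) (c_point : List Int) :
    (PySem.List.pyRange 0 ((PySem.List.pyGet? grid 0).getD 0) 1).foldl (fun acc col =>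
      (PySem.List.pyRange 0 ((PySem.List.pyGet? grid 1).getD 0) 1).foldl (fun acc row =>
        if ((PySem.List.pyGet? ((PySem.List.pyGet? batch_map col).getD []) row).getD 0) = 0 then acc
        else acc ++ [[col, row,
          (col - ((PySem.List.pyGet? c_point 0).getD 0)) * (col - ((PySem.List.pyGet? c_point 0).getD 0))
            + (row - ((PySem.List.pyGet? c_point 1).getD 0)) * (row - ((PySem.List.pyGet? c_point 1).getD 0))]]) acc) []
      = (PySem.List.pyRange 0 ((PySem.List.pyGet? grid 0).getD 0) 1).flatMap (fun col =>
          ((PySem.List.pyRange 0 ((PySem.List.pyGet? grid 1).getD 0) 1).filter (fun row =>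
              ((PySem.List.pyGet? ((PySem.List.pyGet? batch_map col).getD []) row).getD 0) != 0)).map
            (fun row =>
              [col, row,
               (col - ((PySem.List.pyGet? c_point 0).getD 0)) ^ 2
                 + (row - ((PySem.List.pyGet? c_point 1).getD 0)) ^ 2])) := by
  rw [pv_nested_append (skip := fun col row =>
        ((PySem.List.pyGet? ((PySem.List.pyGet? batch_map col).getD []) row).getD 0) = 0)]
  apply List.flatMap_congr; intro col _
  congr 1
  · funext row; simp [pow_two]
  · apply List.filter_congr; intro row _
    by_cases h : ((PySem.List.pyGet? ((PySem.List.pyGet? batch_map col).getD []) row).getD 0) = 0 <;> simp [h]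

-- ===== VERDICT (by name: the statement is the Claim_ definition above) =====
theorem array_DB_batch_spec : Claim_equal_array_DB_batch := by
  intro grid batch_map array_method _ _
  unfold Spec_array_DB_batch array_DB_batch array_DB_batch_alt
  simp only []
  rw [pv_cells_eq]
  exact pv_sorted_eq_select _
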